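-- pv_equiv track=rewrite | github.com/ZiHAO-LI-cmd/Leetcode-Data-Structure | 重塑矩阵.py | matrixReshape
-- ===== SOURCE A (Python) =====
-- from typing import List
--
-- def matrixReshape(mat: List[List[int]], r: int, c: int) -> List[List[int]]:
--     if len(mat) * len(mat[0]) != r * c:
--         return mat
--     res = []
--     tmp = []
--     for i in range(len(mat)):
--         for j in range(len(mat[0])):
--             tmp.append(mat[i][j])
--     index = 0
--     temp = []
--     for k in range(r):
--         for m in range(c):
--             temp.append(tmp[index])
--             index += 1
--         res.append(temp)
--         temp = []
--     return res
-- ===== SOURCE B (Python) =====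
-- def matrixReshape(mat, r, c):
--     cols = len(mat[0])
--     if len(mat) * cols != r * c:
--         return mat
--     return [[mat[(i * c + j) // cols][(i * c + j) % cols] for j in range(c)]
--             for i in range(r)]
-- ===== Notes on version B (the rewrite author's own statement) =====
-- stated objective: simpler
-- what changed: B drops A's intermediate flat list and running index: after the same size guard it builds the r×c result directly in one nested comprehension, locating each source element by div/mod arithmetic on the linear position.
import Mathlib
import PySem

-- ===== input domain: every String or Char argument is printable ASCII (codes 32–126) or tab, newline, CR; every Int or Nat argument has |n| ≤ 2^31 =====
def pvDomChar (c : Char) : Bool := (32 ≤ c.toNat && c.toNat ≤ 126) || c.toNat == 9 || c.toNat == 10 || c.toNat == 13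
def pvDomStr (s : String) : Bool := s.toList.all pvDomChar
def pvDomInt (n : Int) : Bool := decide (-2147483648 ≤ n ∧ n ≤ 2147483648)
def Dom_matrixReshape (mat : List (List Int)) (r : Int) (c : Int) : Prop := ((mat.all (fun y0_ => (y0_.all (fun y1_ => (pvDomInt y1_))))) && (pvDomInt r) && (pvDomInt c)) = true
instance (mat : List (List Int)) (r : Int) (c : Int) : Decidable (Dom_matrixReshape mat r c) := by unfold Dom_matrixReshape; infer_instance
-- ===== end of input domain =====

-- B reshapes by direct div/mod index arithmetic over the target shape, skipping A's intermediate flat list and its index counter; equivalence is about the return value.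

-- ===== PORT A =====
-- A's first double loop: tmp.append(mat[i][j]) for i in range(len(mat)), j in range(len(mat[0])).
-- mat[i]/mat[i][j] are in range under Pre_; pyGetD's defaults are never read there.
def pvFlatLoopA (mat : List (List Int)) (rows cols : Int) : List Int :=
  (PySem.List.pyRange 0 rows 1).foldl (fun tmp i =>
    (PySem.List.pyRange 0 cols 1).foldl (fun tmp2 j =>
      tmp2 ++ [PySem.List.pyGetD (PySem.List.pyGetD mat i []) j 0]) tmp) []

-- A's second double loop; state = (res, index, temp).
def pvChunkLoopA (tmp : List Int) (r c : Int) : List (List Int) × Int × List Int :=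
  (PySem.List.pyRange 0 r 1).foldl (fun st _k =>
    let inner := (PySem.List.pyRange 0 c 1).foldl
      (fun (s : List Int × Int) _m => (s.1 ++ [PySem.List.pyGetD tmp s.2 0], s.2 + 1))
      (st.2.2, st.2.1)
    (st.1 ++ [inner.1], inner.2, ([] : List Int)))
  ([], 0, [])

def matrixReshape (mat : List (List Int)) (r : Int) (c : Int) : List (List Int) :=
  -- len(mat[0]) raises on empty mat; Pre_ excludes that, so the getD default is never read.
  if (mat.length : Int) * ((PySem.List.pyGetD mat 0 []).length : Int) ≠ r * c then mat
  else (pvChunkLoopA (pvFlatLoopA mat (mat.length : Int) ((PySem.List.pyGetD mat 0 []).length : Int)) r c).1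

-- ===== PORT B =====
def matrixReshape_alt (mat : List (List Int)) (r : Int) (c : Int) : List (List Int) :=
  let cols : Int := ((PySem.List.pyGetD mat 0 []).length : Int)
  if (mat.length : Int) * cols ≠ r * c then mat
  else (PySem.List.pyRange 0 r 1).map (fun i =>
    (PySem.List.pyRange 0 c 1).map (fun j =>
      PySem.List.pyGetD
        (PySem.List.pyGetD mat (PySem.Int.floordiv (i * c + j) cols) [])
        (PySem.Int.mod (i * c + j) cols) 0))

-- ===== PRECONDITION & SPEC =====
-- Pre_ excludes exactly the inputs where the Python A raises IndexError: an empty mat (mat[0]),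
-- and, when the size guard passes, a row shorter than len(mat[0]) hit by the flattening loop.
def Pre_matrixReshape (mat : List (List Int)) (r : Int) (c : Int) : Prop :=
  mat ≠ [] ∧
  ((mat.length : Int) * ((mat.headD []).length : Int) = r * c →
    ∀ row ∈ mat, (mat.headD []).length ≤ row.length)
instance (mat : List (List Int)) (r : Int) (c : Int) : Decidable (Pre_matrixReshape mat r c) := by
  unfold Pre_matrixReshape; infer_instance

def pvWitness_matrixReshape : List (List Int) × Int × Int := ([[1, 2], [3, 4]], 1, 4)

def Spec_matrixReshape (mat : List (List Int)) (r : Int) (c : Int) (out : List (List Int)) : Prop := out = matrixReshape_alt mat r c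
instance (mat : List (List Int)) (r : Int) (c : Int) (out : List (List Int)) : Decidable (Spec_matrixReshape mat r c out) := by unfold Spec_matrixReshape; infer_instance

-- ===== CLAIM (what is proved, stated in full; the proofs are below) =====
def Claim_equal_matrixReshape : Prop := ∀ (mat : List (List Int)) (r : Int) (c : Int), Dom_matrixReshape mat r c → Pre_matrixReshape mat r c → Spec_matrixReshape mat r c (matrixReshape mat r c)

-- ===== LEMMAS AND PROOFS =====

-- A's flattening loop is the row-major flatten of the rows×cols rectangle (with total getD).
lemma pvFlat_eq (mat : List (List Int)) (rows cols : Nat) :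
    pvFlatLoopA mat (rows : Int) (cols : Int)
      = (List.range rows).flatMap (fun i => (List.range cols).map (fun j => (mat.getD i []).getD j 0)) := by
  unfold pvFlatLoopA
  have h1 := PySem.List.foldl_congr_mem
    (l := PySem.List.pyRange 0 (rows:Int) 1) (init := ([] : List Int))
    (f := fun tmp i =>
      (PySem.List.pyRange 0 (cols:Int) 1).foldl (fun tmp2 j =>
        tmp2 ++ [PySem.List.pyGetD (PySem.List.pyGetD mat i []) j 0]) tmp)
    (g := fun tmp i =>
      tmp ++ (PySem.List.pyRange 0 (cols:Int) 1).map (fun j => PySem.List.pyGetD (PySem.List.pyGetD mat i []) j 0))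
    (by intro acc x _; exact PySem.List.foldl_append_singleton_eq_map ..)
  rw [h1, PySem.List.foldl_append_eq_flatMap, List.nil_append,
    PySem.List.pyRange_one, PySem.List.pyRange_one]
  simp [List.flatMap_map, List.map_map, Function.comp_def]

-- position p of the row-major flatten of an n×m rectangle is entry (p / m, p % m)
lemma pvFlat_getD (g : Nat → Nat → Int) (n m : Nat) : ∀ p, p < n * m →
    ((List.range n).flatMap (fun i => (List.range m).map (g i))).getD p 0 = g (p / m) (p % m) := by
  induction n with
  | zero => intro p hp; simp at hp
  | succ n ih =>
    intro p hp
    have hsm : (n+1)*m = n*m + m := by ring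
    have hm : 0 < m := by
      rcases Nat.eq_zero_or_pos m with h | h
      · subst h; simp at hp
      · exact h
    have hlen : ((List.range n).flatMap (fun i => (List.range m).map (g i))).length = n * m := by
      simp [List.length_flatMap, mul_comm]
    rw [List.range_succ, List.flatMap_append, List.flatMap_singleton]
    by_cases hc : p < n * m
    · rw [List.getD_append _ _ _ _ (by omega)]
      exact ih p hc
    · have hq : p - n * m < m := by omega
      rw [List.getD_eq_getElem?_getD, List.getElem?_append_right (by omega), hlen,
        ← List.getD_eq_getElem?_getD]
      rw [List.getD_eq_getElem _ _ (by simpa using hq)]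
      rw [List.getElem_map]
      have hpe : p = (p - n * m) + n * m := by omega
      have h1 : p / m = n := by
        conv_lhs => rw [hpe]
        rw [Nat.add_mul_div_right _ _ hm, Nat.div_eq_of_lt hq]; omega
      have h2 : p % m = p - n * m := by
        conv_lhs => rw [hpe]
        rw [Nat.add_mul_mod_self_right]
        exact Nat.mod_eq_of_lt hq
      rw [h1, h2]
      congr 1
      simp

-- A's inner collecting loop: n steps append tmp[i0], …, tmp[i0+n-1] and advance the index by n
lemma pvInner_spec (tmp : List Int) (n : Nat) (t0 : List Int) (i0 : Int) :
    (List.range n).foldl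
      (fun (s : List Int × Int) _m => (s.1 ++ [PySem.List.pyGetD tmp s.2 0], s.2 + 1)) (t0, i0)
    = (t0 ++ (List.range n).map (fun (j : Nat) => PySem.List.pyGetD tmp (i0 + (j : Int)) 0), i0 + (n : Int)) := by
  induction n with
  | zero => simp
  | succ n ih =>
    rw [List.range_succ, List.foldl_append, List.map_append, ih]
    simp only [List.foldl_cons, List.foldl_nil, List.map_singleton, List.append_assoc]
    rw [Prod.mk.injEq]
    refine ⟨rfl, by push_cast; ring⟩

lemma pvInner_spec' (tmp : List Int) (c : Int) (t0 : List Int) (i0 : Int) :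
    (PySem.List.pyRange 0 c 1).foldl
      (fun (s : List Int × Int) _m => (s.1 ++ [PySem.List.pyGetD tmp s.2 0], s.2 + 1)) (t0, i0)
    = (t0 ++ (List.range c.toNat).map (fun (j : Nat) => PySem.List.pyGetD tmp (i0 + (j : Int)) 0), i0 + (c.toNat : Int)) := by
  rw [PySem.List.pyRange_one, List.foldl_map, sub_zero]
  exact pvInner_spec tmp c.toNat t0 i0

-- A's outer chunking loop, with the loop invariant on (res, index, temp = [])
lemma pvChunk_gen (tmp : List Int) (c : Int) (n : Nat) (res0 : List (List Int)) (i0 : Int) :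
    (List.range n).foldl (fun st (_k : Nat) =>
      let inner := (PySem.List.pyRange 0 c 1).foldl
        (fun (s : List Int × Int) _m => (s.1 ++ [PySem.List.pyGetD tmp s.2 0], s.2 + 1))
        (st.2.2, st.2.1)
      (st.1 ++ [inner.1], inner.2, ([] : List Int))) (res0, i0, ([] : List Int))
    = (res0 ++ (List.range n).map (fun (k : Nat) =>
        (List.range c.toNat).map (fun (j : Nat) => PySem.List.pyGetD tmp (i0 + ((k * c.toNat + j : Nat) : Int)) 0)),
       i0 + ((n * c.toNat : Nat) : Int), ([] : List Int)) := by
  induction n with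
  | zero => simp
  | succ n ih =>
    rw [List.range_succ, List.foldl_append, ih, List.map_append]
    simp only [List.foldl_cons, List.foldl_nil, List.map_singleton, pvInner_spec', List.nil_append]
    rw [Prod.mk.injEq, Prod.mk.injEq]
    refine ⟨by rw [List.append_assoc]; congr 2; congr 1; apply List.map_congr_left; intro j _; congr 1; push_cast; ring,
            by push_cast; ring, rfl⟩

lemma pvChunk_eq (tmp : List Int) (r c : Int) :
    (pvChunkLoopA tmp r c).1
      = (List.range r.toNat).map (fun k =>
          (List.range c.toNat).map (fun j => tmp.getD (k * c.toNat + j) 0)) := by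
  unfold pvChunkLoopA
  rw [PySem.List.pyRange_one 0 r, List.foldl_map, sub_zero]
  rw [pvChunk_gen]
  simp only [List.nil_append, zero_add, PySem.List.pyGetD_natCast]

-- ===== VERDICT (by name: the statement is the Claim_ definition above) =====
theorem matrixReshape_spec : Claim_equal_matrixReshape := by
  intro mat r c _hdom _hpre
  unfold Spec_matrixReshape matrixReshape matrixReshape_alt
  dsimp only
  split_ifs with h
  · rfl
  · push Not at h
    set rows := mat.length with hrows
    set cols := (PySem.List.pyGetD mat 0 []).length with hcols
    rw [pvChunk_eq, pvFlat_eq]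
    simp only [PySem.List.pyRange_one, sub_zero, List.map_map]
    apply List.map_congr_left
    intro k hk
    apply List.map_congr_left
    intro j hj
    rw [List.mem_range] at hk hj
    -- an entry exists, so r > 0 and c > 0
    have hcpos : (0:Int) < c := by
      rcases lt_or_ge (0:Int) c with h' | h'
      · exact h'
      · exfalso; have : c.toNat = 0 := by omega
        omega
    have hrpos : (0:Int) < r := by
      rcases lt_or_ge (0:Int) r with h' | h'
      · exact h'
      · exfalso; have : r.toNat = 0 := by omega
        omega
    have hcC : c = (c.toNat : Int) := by omega
    have hrR : r = (r.toNat : Int) := by omega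
    have hRC : rows * cols = r.toNat * c.toNat := by
      have : ((rows * cols : Nat) : Int) = ((r.toNat * c.toNat : Nat) : Int) := by
        push_cast
        rw [h, hcC, hrR]
        simp
      exact_mod_cast this
    have hp : k * c.toNat + j < rows * cols := by
      rw [hRC]
      calc k * c.toNat + j < k * c.toNat + c.toNat := by omega
        _ = (k + 1) * c.toNat := by ring
        _ ≤ r.toNat * c.toNat := Nat.mul_le_mul_right _ (by omega)
    rw [pvFlat_getD _ rows cols _ hp]
    have hidx : ((0:Int) + (k:Int)) * c + ((0:Int) + (j:Int)) = ((k * c.toNat + j : Nat) : Int) := by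
      rw [hcC]; simp
    dsimp only [Function.comp_apply]
    rw [hidx, PySem.Int.floordiv_natCast, PySem.Int.mod_natCast,
      PySem.List.pyGetD_natCast, PySem.List.pyGetD_natCast]
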